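-- pv_equiv track=rewrite | github.com/king22c/tr1a | tr1a/util.py | mix_word
-- ===== SOURCE A (Python) =====
-- import string
-- from typing import Union
--
-- LOWER_CHARS = string.ascii_lowercase
--
-- LOWER_SIZE = len(LOWER_CHARS)
--
-- def num2char(num: int) -> str:
--     if num < LOWER_SIZE:
--         return LOWER_CHARS[num]
--     else:
--         d, m = divmod(num, LOWER_SIZE)
--         return str(d) + LOWER_CHARS[m]
--
-- def fix_arg(w1: Union[str, list], w2: str) -> str:
--     w2 = w2.strip()
--     lw1 = len(w1)
--     lw2 = len(w2)
--     if lw1 > lw2: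
--         lp = lw1 - lw2
--         while True:
--             if lp > lw2:
--                 w2 = w2 * 2
--                 lp = lp - lw2
--                 lw2 = len(w2)
--             else:
--                 w2 = w2 + w2[:lp]
--                 break
--     else:
--         w2 = w2[:lw1]
--     return w2
--
-- def mix_word(w1: str, w2: str) -> str:
--     w2 = fix_arg(w1, w2)
--     ret = []
--     for i in range(0, len(w1)):
--         c1 = ord(w1[i])
--         c2 = ord(w2[i])
--         cm = c1 ^ c2
--         ret.append(num2char(cm))
--     return ''.join(ret)
-- ===== SOURCE B (Python) =====
-- import string
--
-- LOWER_CHARS = string.ascii_lowercase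
-- LOWER_SIZE = len(LOWER_CHARS)
--
-- def num2char(num: int) -> str:
--     if num < LOWER_SIZE:
--         return LOWER_CHARS[num]
--     else:
--         d, m = divmod(num, LOWER_SIZE)
--         return str(d) + LOWER_CHARS[m]
--
-- def mix_word(w1: str, w2: str) -> str:
--     w2s = w2.strip()
--     lw2 = len(w2s)
--     return ''.join(num2char(ord(c) ^ ord(w2s[i % lw2])) for i, c in enumerate(w1))
-- ===== Notes on version B (the rewrite author's own statement) =====
-- stated objective: simpler
-- what changed: Replaces fix_arg's iterative string-doubling construction of an extended key with direct cyclic indexing w2s[i % lw2] in a single comprehension pass.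
import Mathlib
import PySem

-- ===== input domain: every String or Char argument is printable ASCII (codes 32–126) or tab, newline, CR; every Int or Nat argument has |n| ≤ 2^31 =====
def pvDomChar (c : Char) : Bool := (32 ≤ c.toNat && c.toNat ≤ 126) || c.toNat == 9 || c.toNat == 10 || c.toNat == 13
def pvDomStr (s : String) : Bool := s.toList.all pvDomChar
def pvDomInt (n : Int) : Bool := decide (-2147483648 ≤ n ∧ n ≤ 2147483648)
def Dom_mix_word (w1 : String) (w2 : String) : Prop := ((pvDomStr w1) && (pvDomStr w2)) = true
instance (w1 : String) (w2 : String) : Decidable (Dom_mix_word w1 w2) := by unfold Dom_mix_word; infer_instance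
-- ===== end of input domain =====

-- B drops fix_arg's iterative string-doubling key extension and instead indexes the
-- stripped key cyclically (w2s[i % lw2]) in a single pass; objective: simpler.


-- ===== PORT A =====
def LOWER_CHARS : List Char := "abcdefghijklmnopqrstuvwxyz".toList

-- num2char(num): shared helper, identical in A's module and in Source B
def num2char (num : Int) : List Char :=
  if num < 26 then [PySem.List.pyGetD LOWER_CHARS num ' ']
  else PySem.Int.toChars (PySem.Int.floordiv num 26) ++
       [PySem.List.pyGetD LOWER_CHARS (PySem.Int.mod num 26) ' ']

-- the 'while True' loop of fix_arg; terminates when w2 is nonempty (lp strictly drops);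
-- the w2 = [] guard only makes the function total (Python loops forever there; excluded by Pre_)
def fixLoop (w2 : List Char) (lp : Nat) : List Char :=
  if _h0 : w2.length = 0 then w2
  else if _h : lp > w2.length then fixLoop (w2 ++ w2) (lp - w2.length)
  else w2 ++ w2.take lp
termination_by lp
decreasing_by simp; omega

def fix_arg (w1 : List Char) (w2 : List Char) : List Char :=
  let w2s := PySem.Chars.strip w2
  if w1.length > w2s.length then fixLoop w2s (w1.length - w2s.length)
  else w2s.take w1.length

def mix_word (w1 : String) (w2 : String) : String :=
  let w1c := w1.toList
  let w2c := fix_arg w1c w2.toList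
  let ret := (PySem.List.pyRange 0 (w1c.length) 1).foldl (fun acc i =>
      let c1 := (PySem.List.pyGetD w1c i ' ').toNat
      let c2 := (PySem.List.pyGetD w2c i ' ').toNat
      acc ++ [num2char (PySem.Int.bxor (c1 : Int) (c2 : Int))]) []
  String.ofList (PySem.Chars.join [] ret)

-- ===== PORT B =====
def mix_word_alt (w1 : String) (w2 : String) : String :=
  let w2s := PySem.Chars.strip w2.toList
  let lw2 := w2s.length
  String.ofList ((w1.toList.zipIdx.map (fun ci =>
    num2char (PySem.Int.bxor (ci.1.toNat : Int) ((w2s.getD (ci.2 % lw2) ' ').toNat : Int)))).flatten)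

-- ===== PRECONDITION & SPEC =====
-- Pre_ excludes exactly the inputs where w2.strip() is empty while w1 is nonempty:
-- there A's while-loop never terminates (no value is returned; B raises ZeroDivisionError).
def Pre_mix_word (w1 : String) (w2 : String) : Prop :=
  PySem.Chars.strip w2.toList ≠ [] ∨ w1 = ""
instance (w1 : String) (w2 : String) : Decidable (Pre_mix_word w1 w2) := by
  unfold Pre_mix_word; infer_instance
def pvWitness_mix_word : String × String := ("hello", " key ")

def Spec_mix_word (w1 : String) (w2 : String) (out : String) : Prop := out = mix_word_alt w1 w2
instance (w1 : String) (w2 : String) (out : String) : Decidable (Spec_mix_word w1 w2 out) := by unfold Spec_mix_word; infer_instance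

-- ===== CLAIM (what is proved, stated in full; the proofs are below) =====
def Claim_equal_mix_word : Prop := ∀ (w1 : String) (w2 : String), Dom_mix_word w1 w2 → Pre_mix_word w1 w2 → Spec_mix_word w1 w2 (mix_word w1 w2)

-- ===== LEMMAS AND PROOFS =====

-- ''.join(parts) is flatten
theorem join_nil_eq_flatten (ps : List (List Char)) : PySem.Chars.join [] ps = ps.flatten := by
  induction ps with
  | nil => rfl
  | cons p ps ih =>
    cases ps with
    | nil => simp [PySem.Chars.join, List.intercalate]
    | cons q qs =>
      rw [PySem.Chars.join_cons_cons]
      simp_all [PySem.Chars.join]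

-- fixLoop builds the cyclic extension of its (nonempty) initial key:
-- invariant: w is a nonempty prefix of the cyclic repetition of base whose length base divides
theorem fixLoop_spec (base : List Char) (hb : 0 < base.length) :
    ∀ lp (w : List Char), 0 < w.length → base.length ∣ w.length →
    (∀ i, i < w.length → w.getD i ' ' = base.getD (i % base.length) ' ') →
    (fixLoop w lp).length = w.length + lp ∧
    (∀ i, i < w.length + lp → (fixLoop w lp).getD i ' ' = base.getD (i % base.length) ' ') := by
  intro lp
  induction lp using Nat.strong_induction_on with
  | _ lp IH =>
    intro w hw hd hc
    rw [fixLoop]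
    have hne : ¬ w.length = 0 := by omega
    rw [dif_neg hne]
    by_cases h : lp > w.length
    · rw [dif_pos h]
      obtain ⟨k, hk⟩ := hd
      have hc2 : ∀ i, i < (w ++ w).length → (w ++ w).getD i ' ' = base.getD (i % base.length) ' ' := by
        intro i hi
        simp only [List.length_append] at hi
        by_cases hlt : i < w.length
        · rw [List.getD_append _ _ _ _ hlt]; exact hc i hlt
        · push_neg at hlt
          rw [List.getD_append_right _ _ _ _ hlt]
          rw [hc (i - w.length) (by omega)]
          congr 1
          have hieq : i = (i - w.length) + base.length * k := by omega
          conv_rhs => rw [hieq]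
          rw [Nat.add_mul_mod_self_left]
      have := IH (lp - w.length) (by omega) (w ++ w) (by simp; omega)
        (by simp only [List.length_append, hk]; exact ⟨2*k, by ring⟩) hc2
      constructor
      · rw [this.1]; simp; omega
      · intro i hi
        apply this.2
        simp; omega
    · rw [dif_neg h]
      push_neg at h
      constructor
      · simp; omega
      · intro i hi
        by_cases hlt : i < w.length
        · rw [List.getD_append _ _ _ _ hlt]; exact hc i hlt
        · push_neg at hlt
          rw [List.getD_append_right _ _ _ _ hlt]
          have hit : i - w.length < (w.take lp).length := by simp; omega
          rw [List.getD_eq_getElem _ _ hit, List.getElem_take, ← List.getD_eq_getElem _ ' ' ]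
          rw [hc (i - w.length) (by omega)]
          congr 1
          obtain ⟨k, hk⟩ := hd
          have hieq : i = (i - w.length) + base.length * k := by omega
          conv_rhs => rw [hieq]
          rw [Nat.add_mul_mod_self_left]

-- the extended key agrees with cyclic indexing into the stripped key
theorem fix_arg_getD (w1c w2c : List Char) (h : PySem.Chars.strip w2c ≠ [])
    (i : Nat) (hi : i < w1c.length) :
    (fix_arg w1c w2c).getD i ' ' =
      (PySem.Chars.strip w2c).getD (i % (PySem.Chars.strip w2c).length) ' ' := by
  unfold fix_arg
  set s := PySem.Chars.strip w2c with hs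
  have hb : 0 < s.length := List.length_pos_of_ne_nil h
  by_cases hgt : w1c.length > s.length
  · rw [if_pos hgt]
    have := fixLoop_spec s hb (w1c.length - s.length) s hb dvd_rfl
      (fun j hj => by rw [Nat.mod_eq_of_lt hj])
    exact this.2 i (by omega)
  · rw [if_neg hgt]
    have hit : i < (s.take w1c.length).length := by simp; omega
    rw [List.getD_eq_getElem _ _ hit, List.getElem_take, ← List.getD_eq_getElem _ ' ',
        Nat.mod_eq_of_lt (by omega)]

theorem mix_word_agree (w1 w2 : String) (hpre : PySem.Chars.strip w2.toList ≠ [] ∨ w1 = "") :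
    mix_word w1 w2 = mix_word_alt w1 w2 := by
  by_cases hs : PySem.Chars.strip w2.toList = []
  · have hw1 : w1 = "" := by tauto
    subst hw1
    simp [mix_word, mix_word_alt, PySem.List.pyRange_zero, join_nil_eq_flatten]
  · simp only [mix_word, mix_word_alt]
    rw [join_nil_eq_flatten]
    simp only [PySem.List.foldl_append_singleton_eq_map, List.nil_append]
    congr 1
    congr 1
    apply List.ext_getElem
    · simp [PySem.List.length_pyRange_one]
    · intro k h1 h2
      simp only [List.getElem_map, PySem.List.getElem_pyRange_one, List.getElem_zipIdx]
      rw [zero_add]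
      rw [PySem.List.pyGetD_natCast, PySem.List.pyGetD_natCast]
      have hk : k < w1.toList.length := by simpa using h2
      rw [fix_arg_getD _ _ hs k hk]
      rw [List.getD_eq_getElem _ _ hk]
      simp

-- ===== VERDICT (by name: the statement is the Claim_ definition above) =====
theorem mix_word_spec : Claim_equal_mix_word := by
  intro w1 w2 _ hpre
  unfold Spec_mix_word
  unfold Pre_mix_word at hpre
  exact mix_word_agree w1 w2 hpre
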